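-- pv_equiv track=rewrite | github.com/sirati/HangulToHanjaLookupRs | src/main.py | clean_str
-- ===== SOURCE A (Python) =====
-- def clean_str(string):
--     result = string.replace('\t', ' ').replace('\r', ' ').replace('\n', ' ').strip()
--     if result.endswith('(conjugate verb)'):
--         result = clean_str(result[0:-len('(conjugate verb)')])
--     elif result.startswith('a '):
--         result = result[2:]
--     elif result.startswith('an '):
--         result = result[3:]
--     elif result.startswith('one ') or result.startswith('the '):
--         result = result[4:]
--
--     return result
-- ===== SOURCE B (Python) =====
-- def _normalize(s):
--     return s.replace('\t', ' ').replace('\r', ' ').replace('\n', ' ').strip()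
--
--
-- def clean_str(string):
--     result = _normalize(string)
--     suffix = '(conjugate verb)'
--     while result.endswith(suffix):
--         result = _normalize(result[:-len(suffix)])
--     if result.startswith('a '):
--         result = result[2:]
--     elif result.startswith('an '):
--         result = result[3:]
--     elif result.startswith('one ') or result.startswith('the '):
--         result = result[4:]
--     return result
-- ===== Notes on version B (the rewrite author's own statement) =====
-- stated objective: simpler
-- what changed: A's self-recursion for stripping the repeated conjugate-verb suffix is flattened into an explicit while loop that re-normalizes the chopped remainder each iteration, with the article/verb prefix checks done once after the loop.
import Mathlib
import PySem

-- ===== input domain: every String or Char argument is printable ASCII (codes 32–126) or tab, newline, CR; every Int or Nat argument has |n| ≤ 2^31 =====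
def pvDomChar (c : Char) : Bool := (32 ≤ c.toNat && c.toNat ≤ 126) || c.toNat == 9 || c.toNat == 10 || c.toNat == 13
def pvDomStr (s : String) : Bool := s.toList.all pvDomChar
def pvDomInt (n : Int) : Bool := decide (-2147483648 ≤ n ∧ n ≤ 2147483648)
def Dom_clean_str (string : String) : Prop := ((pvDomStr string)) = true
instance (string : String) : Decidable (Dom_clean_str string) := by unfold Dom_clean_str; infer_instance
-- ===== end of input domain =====

-- B replaces A's self-recursion by an explicit suffix-stripping loop followed by a single
-- post-loop prefix check (objective: simpler — an iterative decomposition, same results).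

-- ===== PORT A =====
-- shared helper: the whitespace normalisation result = s.replace('\t',' ').replace('\r',' ').replace('\n',' ').strip()
def pvNorm (s : List Char) : List Char :=
  PySem.Chars.strip (PySem.Chars.replace (PySem.Chars.replace (PySem.Chars.replace s ['\t'] [' ']) ['\r'] [' ']) ['\n'] [' '])

-- termination facts the ports cite
theorem pvReplaceGo_single_length (o n : Char) :
    ∀ fuel l acc : _, (PySem.Chars.replace.go [o] [n] fuel l acc).length = acc.length + l.length := by
  intro fuel
  induction fuel with
  | zero => intro l acc; simp [PySem.Chars.replace.go]
  | succ fuel ih =>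
    intro l acc
    cases l with
    | nil => simp [PySem.Chars.replace.go]
    | cons c t =>
      rw [PySem.Chars.replace.go]
      by_cases h : [o].isPrefixOf (c :: t) = true
      · simp only [h, if_true]
        rw [ih]
        simp
        omega
      · rw [if_neg h]
        rw [ih]
        simp
        omega

theorem pvReplace_single_length (s : List Char) (o n : Char) :
    (PySem.Chars.replace s [o] [n]).length = s.length := by
  rw [PySem.Chars.replace]
  simp [pvReplaceGo_single_length]

theorem pvStrip_length_le (s : List Char) : (PySem.Chars.strip s).length ≤ s.length := by
  unfold PySem.Chars.strip PySem.Chars.rstrip PySem.Chars.lstrip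
  have h1 := List.length_dropWhile_le (p := PySem.Chars.isspace) (l := s)
  have h2 := List.length_dropWhile_le (p := PySem.Chars.isspace)
      (l := (List.dropWhile PySem.Chars.isspace s).reverse)
  simpa using le_trans (by simpa using h2) (by simpa using h1)

theorem pvNorm_length_le (s : List Char) : (pvNorm s).length ≤ s.length := by
  unfold pvNorm
  calc (PySem.Chars.strip _).length ≤ _ := pvStrip_length_le _
    _ = s.length := by rw [pvReplace_single_length, pvReplace_single_length, pvReplace_single_length]

theorem pvEnds_len {r p : List Char} (h : PySem.Chars.endswith r p = true) : p.length ≤ r.length := by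
  exact ((PySem.Chars.endswith_iff _ _).mp h).length_le

theorem pvSliceTo16_length (r : List Char) (_h : 16 ≤ r.length) :
    (PySem.List.slice r none (some (-16))).length = r.length - 16 := by
  rw [PySem.List.slice_to_neg_ofNat r 16 (by omega)]
  simp

-- literal transliteration of A: recursive clean_str
def cleanA (s : List Char) : List Char :=
  if h : PySem.Chars.endswith (pvNorm s) ("(conjugate verb)".toList) = true then
    cleanA (PySem.List.slice (pvNorm s) (some 0) (some (-16)))
  else if PySem.Chars.startswith (pvNorm s) ("a ".toList) then
    PySem.List.slice (pvNorm s) (some 2) none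
  else if PySem.Chars.startswith (pvNorm s) ("an ".toList) then
    PySem.List.slice (pvNorm s) (some 3) none
  else if PySem.Chars.startswith (pvNorm s) ("one ".toList) || PySem.Chars.startswith (pvNorm s) ("the ".toList) then
    PySem.List.slice (pvNorm s) (some 4) none
  else pvNorm s
termination_by s.length
decreasing_by
  have h16 : (16 : ℕ) ≤ (pvNorm s).length := by simpa using pvEnds_len h
  have hle := pvNorm_length_le s
  rw [PySem.List.slice_zero_start, pvSliceTo16_length _ h16]
  omega

def clean_str (string : String) : String := String.ofList (cleanA string.toList)

-- ===== PORT B =====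
-- the while loop: while result.endswith(suffix): result = _normalize(result[:-len(suffix)])
def stripCV (r : List Char) : List Char :=
  if h : PySem.Chars.endswith r ("(conjugate verb)".toList) = true then
    stripCV (pvNorm (PySem.List.slice r none (some (-16))))
  else r
termination_by r.length
decreasing_by
  have h16 : (16 : ℕ) ≤ r.length := by simpa using pvEnds_len h
  have hle := pvNorm_length_le (PySem.List.slice r none (some (-16)))
  rw [pvSliceTo16_length _ h16] at hle
  omega

def cleanB (s : List Char) : List Char :=
  if PySem.Chars.startswith (stripCV (pvNorm s)) ("a ".toList) then
    PySem.List.slice (stripCV (pvNorm s)) (some 2) none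
  else if PySem.Chars.startswith (stripCV (pvNorm s)) ("an ".toList) then
    PySem.List.slice (stripCV (pvNorm s)) (some 3) none
  else if PySem.Chars.startswith (stripCV (pvNorm s)) ("one ".toList) || PySem.Chars.startswith (stripCV (pvNorm s)) ("the ".toList) then
    PySem.List.slice (stripCV (pvNorm s)) (some 4) none
  else stripCV (pvNorm s)

def clean_str_alt (string : String) : String := String.ofList (cleanB string.toList)

-- ===== PRECONDITION & SPEC =====
def Spec_clean_str (string : String) (out : String) : Prop := out = clean_str_alt string
instance (string : String) (out : String) : Decidable (Spec_clean_str string out) := by unfold Spec_clean_str; infer_instance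

-- ===== CLAIM (what is proved, stated in full; the proofs are below) =====
def Claim_equal_clean_str : Prop := ∀ (string : String), Dom_clean_str string → Spec_clean_str string (clean_str string)

-- ===== LEMMAS AND PROOFS =====

theorem stripCV_of_not_endswith {r : List Char}
    (h : ¬ PySem.Chars.endswith r ("(conjugate verb)".toList) = true) : stripCV r = r := by
  rw [stripCV, dif_neg h]

theorem stripCV_of_endswith {r : List Char}
    (h : PySem.Chars.endswith r ("(conjugate verb)".toList) = true) :
    stripCV r = stripCV (pvNorm (PySem.List.slice r none (some (-16)))) := by
  rw [stripCV, dif_pos h]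

theorem cleanA_eq_cleanB_aux : ∀ n, ∀ s : List Char, s.length < n → cleanA s = cleanB s := by
  intro n
  induction n with
  | zero => intro s h; omega
  | succ n ih =>
    intro s hs
    by_cases hend : PySem.Chars.endswith (pvNorm s) ("(conjugate verb)".toList) = true
    · rw [cleanA]
      simp only [hend, dif_pos]
      rw [PySem.List.slice_zero_start]
      have h16 : (16 : ℕ) ≤ (pvNorm s).length := by simpa using pvEnds_len hend
      have hle := pvNorm_length_le s
      have hlen : (PySem.List.slice (pvNorm s) none (some (-16))).length < n := by
        rw [pvSliceTo16_length _ h16]; omega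
      rw [ih _ hlen]
      unfold cleanB
      rw [← stripCV_of_endswith hend]
    · rw [cleanA, dif_neg hend]
      unfold cleanB
      rw [stripCV_of_not_endswith hend]

theorem cleanA_eq_cleanB (s : List Char) : cleanA s = cleanB s :=
  cleanA_eq_cleanB_aux (s.length + 1) s (by omega)

-- ===== VERDICT (by name: the statement is the Claim_ definition above) =====
theorem clean_str_spec : Claim_equal_clean_str := by
  intro string _
  unfold Spec_clean_str clean_str clean_str_alt
  rw [cleanA_eq_cleanB]
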